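-- pv_equiv track=rewrite | github.com/Ambient567/V0-Python-Velisa | Python-basics/decomposition/C-composition/lala_language.py | lala_language
-- ===== SOURCE A (Python) =====
-- def lala_language(sentence):
--     words = sentence.split(" ")
--     result = []
--
--     for word in words:
--         if len(word) > 3:
--             new_word = change_vowel(word)
--             result.append(new_word)
--         else:
--             result.append(word)
--
--     return " ".join(result)
--
-- def change_vowel(word):
--     vowels = "aeiou"
--     changed_word = ""
--
--     for char in word:
--         if char in vowels:
--             changed_word += char + "l" + char
--         else:
--             changed_word += char
--
--     return changed_word
-- ===== SOURCE B (Python) =====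
-- def lala_language(sentence):
--     out = []
--     word = []
--
--     def flush():
--         if len(word) > 3:
--             out.extend(c + "l" + c if c in "aeiou" else c for c in word)
--         else:
--             out.extend(word)
--
--     for ch in sentence:
--         if ch == " ":
--             flush()
--             out.append(" ")
--             word = []
--         else:
--             word.append(ch)
--     flush()
--     return "".join(out)
-- ===== Notes on version B (the rewrite author's own statement) =====
-- stated objective: alternative
-- what changed: Replaces A's split-into-words / per-word helper loop / join pipeline by a single left-to-right state-machine pass over the sentence that accumulates the current word and flushes it (transformed if longer than 3) at each space and at the end.
import Mathlib
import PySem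

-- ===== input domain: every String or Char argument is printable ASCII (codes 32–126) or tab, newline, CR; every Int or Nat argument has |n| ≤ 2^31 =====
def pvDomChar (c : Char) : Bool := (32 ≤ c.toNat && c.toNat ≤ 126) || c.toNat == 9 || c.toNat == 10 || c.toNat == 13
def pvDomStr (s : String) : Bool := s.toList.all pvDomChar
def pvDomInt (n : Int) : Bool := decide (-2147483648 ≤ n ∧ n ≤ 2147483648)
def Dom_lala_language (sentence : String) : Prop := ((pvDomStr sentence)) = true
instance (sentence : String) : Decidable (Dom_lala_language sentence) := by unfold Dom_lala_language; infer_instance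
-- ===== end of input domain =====

-- B replaces A's split/per-word-helper/join pipeline with a single state-machine pass (alternative decomposition, same cost).

-- ===== PORT A =====
-- change_vowel: character loop accumulating changed_word ('char in "aeiou"' on a single char = list membership, exact)
def changeVowelA (word : List Char) : List Char :=
  word.foldl (fun changed c => if c ∈ "aeiou".toList then changed ++ [c, 'l', c] else changed ++ [c]) []

def lala_language (sentence : String) : String :=
  let words := PySem.Chars.splitOn sentence.toList [' ']
  let result := words.foldl
    (fun res w => if w.length > 3 then res ++ [changeVowelA w] else res ++ [w]) []
  String.ofList (PySem.Chars.join [' '] result)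

-- ===== PORT B =====
-- flush(): emit the pending word, vowel-doubled when longer than 3
def flushB (word : List Char) : List Char :=
  if word.length > 3 then
    word.flatMap (fun c => if c ∈ "aeiou".toList then [c, 'l', c] else [c])
  else word

def goB : List Char → List Char → List Char → List Char
  | [], word, out => out ++ flushB word
  | c :: rest, word, out =>
      if c = ' ' then goB rest [] (out ++ flushB word ++ [' '])
      else goB rest (word ++ [c]) out

def lala_language_alt (sentence : String) : String :=
  String.ofList (goB sentence.toList [] [])

-- ===== PRECONDITION & SPEC =====
def Spec_lala_language (sentence : String) (out : String) : Prop := out = lala_language_alt sentence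
instance (sentence : String) (out : String) : Decidable (Spec_lala_language sentence out) := by unfold Spec_lala_language; infer_instance

-- ===== CLAIM (what is proved, stated in full; the proofs are below) =====
def Claim_equal_lala_language : Prop := ∀ (sentence : String), Dom_lala_language sentence → Spec_lala_language sentence (lala_language sentence)

-- ===== LEMMAS AND PROOFS =====

-- proof-only helper: the words produced by splitting on ' ' (cur is the reversed pending word)
def spl : List Char → List Char → List (List Char)
  | [], cur => [cur.reverse]
  | c :: rest, cur => if c = ' ' then cur.reverse :: spl rest [] else spl rest (c :: cur)

theorem spl_ne_nil (l cur : List Char) : spl l cur ≠ [] := by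
  cases l with
  | nil => simp [spl]
  | cons c rest =>
      simp only [spl]
      split_ifs <;> simp [spl_ne_nil]

theorem splitOn_go_space (fuel : Nat) (l cur : List Char) (acc : List (List Char)) (h : l.length < fuel) :
    PySem.Chars.splitOn.go [' '] fuel l cur acc = acc.reverse ++ spl l cur := by
  induction fuel generalizing l cur acc with
  | zero => omega
  | succ n ih =>
      cases l with
      | nil => rw [PySem.Chars.splitOn.go.eq_def]; simp [spl]
      | cons c rest =>
          have hlen : rest.length < n := by simpa using h
          by_cases hc : c = ' '
          · subst hc
            rw [show PySem.Chars.splitOn.go [' '] (n+1) (' '::rest) cur acc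
                  = PySem.Chars.splitOn.go [' '] n rest [] (cur.reverse :: acc) from by
              rw [PySem.Chars.splitOn.go.eq_def]; simp [List.isPrefixOf]]
            rw [ih rest [] _ hlen]
            simp [spl]
          · have hne : (' ' : Char) ≠ c := fun h' => hc h'.symm
            rw [show PySem.Chars.splitOn.go [' '] (n+1) (c::rest) cur acc
                  = PySem.Chars.splitOn.go [' '] n rest (c::cur) acc from by
              rw [PySem.Chars.splitOn.go.eq_def]; simp [List.isPrefixOf, hne]]
            rw [ih rest (c::cur) acc hlen]
            simp [spl, hc]

theorem splitOn_space (cs : List Char) : PySem.Chars.splitOn cs [' '] = spl cs [] := by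
  have := splitOn_go_space (cs.length + 1) cs [] [] (by omega)
  simpa [PySem.Chars.splitOn] using this

theorem changeVowelA_eq_flatMap (w : List Char) :
    changeVowelA w = w.flatMap (fun c => if c ∈ "aeiou".toList then [c, 'l', c] else [c]) := by
  unfold changeVowelA
  rw [show (fun (changed : List Char) (c : Char) =>
        if c ∈ "aeiou".toList then changed ++ [c, 'l', c] else changed ++ [c])
      = (fun changed c => changed ++ if c ∈ "aeiou".toList then [c, 'l', c] else [c]) by
    funext changed c; split_ifs <;> rfl]
  simpa using PySem.List.foldl_append_eq_flatMap (fun c => if c ∈ "aeiou".toList then [c, 'l', c] else [c]) w []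

theorem resultA_eq_map (ws : List (List Char)) :
    ws.foldl (fun res w => if w.length > 3 then res ++ [changeVowelA w] else res ++ [w]) []
      = ws.map flushB := by
  rw [show (fun (res : List (List Char)) (w : List Char) =>
        if w.length > 3 then res ++ [changeVowelA w] else res ++ [w])
      = (fun res w => res ++ [flushB w]) by
    funext res w
    simp only [flushB]
    split_ifs <;> simp [changeVowelA_eq_flatMap]]
  simpa using PySem.List.foldl_append_singleton_eq_map flushB ws []

theorem goB_spec (cs word out : List Char) :
    goB cs word out = out ++ PySem.Chars.join [' '] ((spl cs word.reverse).map flushB) := by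
  induction cs generalizing word out with
  | nil => simp [goB, spl, PySem.Chars.join_singleton]
  | cons c rest ih =>
      simp only [goB, spl]
      by_cases hc : c = ' '
      · subst hc
        rw [if_pos rfl, if_pos rfl, ih]
        obtain ⟨b, l, hb⟩ : ∃ b l, spl rest ([] : List Char).reverse = b :: l := by
          rcases h : spl rest ([] : List Char).reverse with _ | ⟨b, l⟩
          · exact absurd h (spl_ne_nil _ _)
          · exact ⟨b, l, rfl⟩
        simp only [List.reverse_nil] at hb ⊢
        rw [hb]
        simp [PySem.Chars.join_cons_cons]
      · rw [if_neg hc, if_neg hc, ih]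
        simp

theorem lala_eq (cs : List Char) :
    PySem.Chars.join [' '] (((PySem.Chars.splitOn cs [' ']).foldl
        (fun res w => if w.length > 3 then res ++ [changeVowelA w] else res ++ [w]) []))
      = goB cs [] [] := by
  rw [resultA_eq_map, splitOn_space, goB_spec]
  simp

-- ===== VERDICT (by name: the statement is the Claim_ definition above) =====
theorem lala_language_spec : Claim_equal_lala_language := by
  intro sentence _
  unfold Spec_lala_language lala_language lala_language_alt
  simp only []
  rw [lala_eq]
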